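-- pv_equiv track=rewrite | github.com/beerwithstraw/NL35 | nl35_extractor/extractor/companies/raheja_qbe.py | _merge_split_lobs
-- ===== SOURCE A (Python) =====
-- from typing import Dict, List, Optional, Tuple
--
-- def _merge_split_lobs(
--     lob_cols: List[Tuple[str, Optional[int], Optional[int]]]
-- ) -> List[Tuple[str, Optional[int], Optional[int]]]:
--     """Merge duplicate LOB entries where one carries qtr_col and the other ytd_col.
--     Handles grand_total split (col 17 = qtr, col 18 = ytd)."""
--     merged: Dict[str, List] = {}
--     order: List[str] = []
--     for lob, qc, yc in lob_cols:
--         if lob not in merged: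
--             merged[lob] = [qc, yc]
--             order.append(lob)
--         else:
--             if qc is not None:
--                 merged[lob][0] = qc
--             if yc is not None:
--                 merged[lob][1] = yc
--     return [(lob, merged[lob][0], merged[lob][1]) for lob in order]
-- ===== SOURCE B (Python) =====
-- from typing import Dict, List, Optional, Tuple
--
-- def _merge_split_lobs(
--     lob_cols: List[Tuple[str, Optional[int], Optional[int]]]
-- ) -> List[Tuple[str, Optional[int], Optional[int]]]:
--     """Group-then-reduce: collect each label's (qc, yc) pairs in first-seen
--     order, then reduce each group to (last non-None qc, last non-None yc)."""
--     groups: Dict[str, List[Tuple[Optional[int], Optional[int]]]] = {}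
--     for lob, qc, yc in lob_cols:
--         groups[lob] = groups.get(lob, []) + [(qc, yc)]
--     out: List[Tuple[str, Optional[int], Optional[int]]] = []
--     for lob, pairs in groups.items():
--         qc = next((q for q, _ in reversed(pairs) if q is not None), None)
--         yc = next((y for _, y in reversed(pairs) if y is not None), None)
--         out.append((lob, qc, yc))
--     return out
-- ===== Notes on version B (the rewrite author's own statement) =====
-- stated objective: alternative
-- what changed: Replaces A's single on-the-fly merging scan (a dict of mutable [qc, yc] cells updated per row) by a two-pass group-then-reduce decomposition: first partition the rows into an order-preserving dict of per-label (qc, yc) lists, then reduce each group to its last non-None qc and last non-None yc.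
import Mathlib
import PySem

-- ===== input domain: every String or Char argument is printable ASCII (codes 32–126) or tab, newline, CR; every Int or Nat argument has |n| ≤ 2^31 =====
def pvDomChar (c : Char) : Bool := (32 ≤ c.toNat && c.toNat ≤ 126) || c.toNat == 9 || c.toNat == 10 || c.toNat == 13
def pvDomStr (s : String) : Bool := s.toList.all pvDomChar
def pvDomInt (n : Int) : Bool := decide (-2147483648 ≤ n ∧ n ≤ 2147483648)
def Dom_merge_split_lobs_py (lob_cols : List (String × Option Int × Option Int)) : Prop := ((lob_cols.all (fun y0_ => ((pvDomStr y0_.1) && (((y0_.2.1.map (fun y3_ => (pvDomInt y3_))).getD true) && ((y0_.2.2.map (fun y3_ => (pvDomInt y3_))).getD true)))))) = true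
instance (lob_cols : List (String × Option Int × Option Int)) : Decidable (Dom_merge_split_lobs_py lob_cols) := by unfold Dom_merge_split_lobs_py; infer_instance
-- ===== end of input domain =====

-- B replaces A's on-the-fly merging scan by a group-first-then-reduce two-pass
-- decomposition (alternative structure; same cost, return value identical).

-- ===== PORT A =====
-- one iteration of A's loop over the state (merged, order)
def pvStepA (st : PySem.Dict String (Option Int × Option Int) × List String)
    (x : String × Option Int × Option Int) :
    PySem.Dict String (Option Int × Option Int) × List String :=
  if !(st.1.contains x.1) then
    (st.1.insert x.1 (x.2.1, x.2.2), st.2 ++ [x.1])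
  else
    let v := (st.1.get? x.1).getD (none, none)   -- merged[lob]; the key is present here
    let v1 := if x.2.1.isSome then x.2.1 else v.1
    let v2 := if x.2.2.isSome then x.2.2 else v.2
    (st.1.insert x.1 (v1, v2), st.2)

-- A's whole loop: (merged, order) after processing lob_cols
def pvLoopA (lob_cols : List (String × Option Int × Option Int)) :
    PySem.Dict String (Option Int × Option Int) × List String :=
  lob_cols.foldl pvStepA (PySem.Dict.empty, [])

def merge_split_lobs_py (lob_cols : List (String × Option Int × Option Int)) :
    List (String × Option Int × Option Int) :=
  (pvLoopA lob_cols).2.map (fun lob =>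
    (lob, (((pvLoopA lob_cols).1.get? lob).getD (none, none)).1,
      (((pvLoopA lob_cols).1.get? lob).getD (none, none)).2))

-- ===== PORT B =====
-- B's first pass: group the (qc, yc) pairs by label, in first-seen order
def pvGroups (lob_cols : List (String × Option Int × Option Int)) :
    PySem.Dict String (List (Option Int × Option Int)) :=
  lob_cols.foldl (fun d x => d.modify x.1 [] (· ++ [x.2])) PySem.Dict.empty

def merge_split_lobs_py_alt (lob_cols : List (String × Option Int × Option Int)) :
    List (String × Option Int × Option Int) :=
  (pvGroups lob_cols).items.map (fun p =>
    (p.1, p.2.reverse.findSome? (·.1), p.2.reverse.findSome? (·.2)))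

-- ===== PRECONDITION & SPEC =====
def Spec_merge_split_lobs_py (lob_cols : List (String × Option Int × Option Int)) (out : List (String × Option Int × Option Int)) : Prop := out = merge_split_lobs_py_alt lob_cols
instance (lob_cols : List (String × Option Int × Option Int)) (out : List (String × Option Int × Option Int)) : Decidable (Spec_merge_split_lobs_py lob_cols out) := by unfold Spec_merge_split_lobs_py; infer_instance

-- ===== CLAIM (what is proved, stated in full; the proofs are below) =====
def Claim_equal_merge_split_lobs_py : Prop := ∀ (lob_cols : List (String × Option Int × Option Int)), Dom_merge_split_lobs_py lob_cols → Spec_merge_split_lobs_py lob_cols (merge_split_lobs_py lob_cols)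

-- ===== LEMMAS AND PROOFS =====

-- A's per-entry update of a merged value
def pvStepV (v p : Option Int × Option Int) : Option Int × Option Int :=
  (if p.1.isSome then p.1 else v.1, if p.2.isSome then p.2 else v.2)

-- A's fresh-key value is the update applied to the all-None default
theorem pvStepV_none (p : Option Int × Option Int) :
    pvStepV (none, none) p = (p.1, p.2) := by
  rcases p with ⟨q, y⟩
  cases q <;> cases y <;> rfl

-- B's reducer equals the left fold of A's update over the group
theorem pvReduce_eq (ps : List (Option Int × Option Int)) :
    (ps.reverse.findSome? (·.1), ps.reverse.findSome? (·.2)) =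
      ps.foldl pvStepV (none, none) := by
  induction ps using List.reverseRecOn with
  | nil => rfl
  | append_singleton ps x ih =>
    simp only [List.reverse_append, List.reverse_cons, List.reverse_nil, List.nil_append,
      List.foldl_append, List.foldl_cons, List.foldl_nil, ← ih, pvStepV]
    rcases x with ⟨q, y⟩
    cases q <;> cases y <;> rfl

-- the invariant of A's loop: order = keys, keys = first-seen dedup of the labels,
-- and each merged value is the pvStepV-fold of that label's group
theorem pvInvA (l : List (String × Option Int × Option Int)) :
    (pvLoopA l).2 = (pvLoopA l).1.keys ∧
      (pvLoopA l).1.keys = PySem.Set.ofList (l.map (·.1)) ∧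
      ∀ lob, (pvLoopA l).1.getD lob (none, none) =
        ((l.filter (fun p => p.1 == lob)).map (·.2)).foldl pvStepV (none, none) := by
  induction l using List.reverseRecOn with
  | nil => exact ⟨rfl, rfl, fun lob => rfl⟩
  | append_singleton l x ih =>
    obtain ⟨hord, hkeys, hval⟩ := ih
    have hstep : pvLoopA (l ++ [x]) = pvStepA (pvLoopA l) x := by
      simp [pvLoopA, List.foldl_append]
    set st := pvLoopA l with hst
    by_cases hc : st.1.contains x.1
    · -- existing key
      have hmem : x.1 ∈ st.1.keys := (PySem.Dict.contains_iff_mem_keys _ _).1 hc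
      have hstepA : pvStepA st x =
          (st.1.insert x.1 (pvStepV ((st.1.get? x.1).getD (none, none)) x.2), st.2) := by
        simp [pvStepA, hc, pvStepV]
      rw [hstep, hstepA]
      have hk : (st.1.insert x.1 (pvStepV ((st.1.get? x.1).getD (none, none)) x.2)).keys
          = st.1.keys := PySem.Dict.keys_insert_of_contains st.1 _ hc
      refine ⟨by rw [hk]; exact hord, ?_, ?_⟩
      · rw [hk, hkeys]
        simp only [List.map_append, List.map_cons, List.map_nil,
          PySem.Set.ofList_append_singleton]
        rw [PySem.Set.add_of_mem (hkeys ▸ hmem)]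
      · intro lob
        rw [PySem.Dict.getD_insert, List.filter_append, List.map_append]
        by_cases he : lob = x.1
        · simp only [he, List.filter_cons, List.filter_nil, beq_self_eq_true, if_true,
            List.map_cons, List.map_nil, List.foldl_append, List.foldl_cons, List.foldl_nil]
          rw [← PySem.Dict.getD_eq_get?_getD, hval x.1]
        · have hne : (x.1 == lob) = false := by
            simp only [beq_eq_false_iff_ne, ne_eq]
            exact fun h => he h.symm
          simp [he, hne, hval lob]
    · -- fresh key
      have hcf : st.1.contains x.1 = false := by simpa using hc
      have hnone : st.1.get? x.1 = none := by
        have h := PySem.Dict.contains_eq_isSome_get? st.1 x.1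
        rw [hcf] at h
        exact Option.not_isSome_iff_eq_none.1 (by simp [← h])
      have hstepA : pvStepA st x = (st.1.insert x.1 (x.2.1, x.2.2), st.2 ++ [x.1]) := by
        simp [pvStepA, hcf]
      rw [hstep, hstepA]
      have hk := PySem.Dict.keys_insert_of_not_contains st.1 (x.2.1, x.2.2) hcf
      have hnm : x.1 ∉ PySem.Set.ofList (l.map (·.1)) := by
        rw [← hkeys]
        exact fun h => hc ((PySem.Dict.contains_iff_mem_keys _ _).2 h)
      refine ⟨by rw [hk, hord], ?_, ?_⟩
      · rw [hk, hkeys]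
        simp only [List.map_append, List.map_cons, List.map_nil,
          PySem.Set.ofList_append_singleton]
        rw [PySem.Set.add_of_not_mem hnm]
      · intro lob
        rw [PySem.Dict.getD_insert, List.filter_append, List.map_append]
        by_cases he : lob = x.1
        · have h0 : ((l.filter (fun p => p.1 == x.1)).map (·.2)).foldl pvStepV (none, none)
              = ((none : Option Int), (none : Option Int)) := by
            rw [← hval x.1, PySem.Dict.getD_of_get?_eq_none st.1 _ hnone]
          simp only [he, List.filter_cons, List.filter_nil, beq_self_eq_true, if_true,
            List.map_cons, List.map_nil, List.foldl_append, List.foldl_cons, List.foldl_nil, h0, pvStepV_none]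
        · have hne : (x.1 == lob) = false := by
            simp only [beq_eq_false_iff_ne, ne_eq]
            exact fun h => he h.symm
          simp [he, hne, hval lob]

-- ===== VERDICT (by name: the statement is the Claim_ definition above) =====
theorem merge_split_lobs_py_spec : Claim_equal_merge_split_lobs_py := by
  intro lob_cols _
  unfold Spec_merge_split_lobs_py merge_split_lobs_py merge_split_lobs_py_alt
  obtain ⟨hord, hkeys, hval⟩ := pvInvA lob_cols
  have hgk : (pvGroups lob_cols).keys = PySem.Set.ofList (lob_cols.map (·.1)) := by
    rw [pvGroups, PySem.Dict.keys_foldl_modify_key lob_cols (·.1) []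
      (fun _ x => (· ++ [x.2]))]
    simp [PySem.Set.update_nil_left]
  have hgnd : (pvGroups lob_cols).keys.Nodup := hgk ▸ PySem.Set.nodup_ofList _
  have hitems : (pvGroups lob_cols).items =
      (pvGroups lob_cols).keys.map (fun k => (k, (pvGroups lob_cols).getD k [])) :=
    PySem.Dict.items_eq_map_keys _ hgnd []
  have hgv : ∀ lob, (pvGroups lob_cols).getD lob [] =
      (lob_cols.filter (fun p => p.1 == lob)).map (·.2) := by
    intro lob
    rw [pvGroups, PySem.Dict.getD_foldl_modify_append]
    simp
  rw [hitems, List.map_map, hord, hkeys, hgk]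
  apply List.map_congr_left
  intro lob _
  simp only [Function.comp, hgv lob, ← pvReduce_eq, ← PySem.Dict.getD_eq_get?_getD, hval lob]
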